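-- pv_equiv track=rewrite | github.com/lysyloxidase/parkinson-ai | parkinson_ai/knowledge_graph/staging.py | _genetic_axis
-- ===== SOURCE A (Python) =====
-- from typing import Literal
--
-- def _genetic_axis(variants: list[str]) -> Literal["G0", "G1", "G2"]:
--     """Assign the genetic axis."""
--
--     normalized = {variant.lower() for variant in variants}
--     causative = {
--         "lrrk2 g2019s",
--         "gba1 l444p",
--         "snca duplication",
--         "snca triplication",
--         "park2",
--         "pink1",
--         "dj-1",
--         "vps35 d620n",
--     }
--     risk = {
--         "gba1 n370s",
--         "gba1 e326k",
--         "gba1 t369m",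
--         "prs high",
--         "high polygenic risk percentile",
--     }
--     if normalized.intersection(causative):
--         return "G2"
--     if normalized.intersection(risk):
--         return "G1"
--     return "G0"
-- ===== SOURCE B (Python) =====
-- def _genetic_axis(variants):
--     """Assign the genetic axis (single-pass, table-driven)."""
--     rank = {
--         "lrrk2 g2019s": 2,
--         "gba1 l444p": 2,
--         "snca duplication": 2,
--         "snca triplication": 2,
--         "park2": 2,
--         "pink1": 2,
--         "dj-1": 2,
--         "vps35 d620n": 2,
--         "gba1 n370s": 1,
--         "gba1 e326k": 1,
--         "gba1 t369m": 1,
--         "prs high": 1,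
--         "high polygenic risk percentile": 1,
--     }
--     best = 0
--     for v in variants:
--         best = max(best, rank.get(v.lower(), 0))
--     return "G2" if best == 2 else "G1" if best == 1 else "G0"
-- ===== Notes on version B (the rewrite author's own statement) =====
-- stated objective: simpler
-- what changed: Replaces A's set-comprehension plus two set-intersection guards by one severity-rank dict and a single max-reduction pass over the lowercased variants, decoding the max rank to G2/G1/G0 at the end.
import Mathlib
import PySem

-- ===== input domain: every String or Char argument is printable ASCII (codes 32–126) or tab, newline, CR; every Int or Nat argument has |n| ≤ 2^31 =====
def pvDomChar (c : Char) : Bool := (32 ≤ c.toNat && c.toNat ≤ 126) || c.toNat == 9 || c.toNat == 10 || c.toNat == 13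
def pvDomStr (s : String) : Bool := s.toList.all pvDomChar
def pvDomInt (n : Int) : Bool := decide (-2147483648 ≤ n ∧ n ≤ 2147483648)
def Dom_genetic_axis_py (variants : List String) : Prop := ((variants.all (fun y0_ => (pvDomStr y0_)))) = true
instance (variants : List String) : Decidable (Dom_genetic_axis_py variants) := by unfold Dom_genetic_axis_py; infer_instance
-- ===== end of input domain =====

-- B replaces A's two set-intersection guards by a single max-reduction over a severity-rank table (objective: simpler).


-- ===== PORT A =====
-- A-side helpers: the two literal sets from A's source
def pvCaus : List String :=
  ["lrrk2 g2019s", "gba1 l444p", "snca duplication", "snca triplication",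
   "park2", "pink1", "dj-1", "vps35 d620n"]
def pvRisk : List String :=
  ["gba1 n370s", "gba1 e326k", "gba1 t369m", "prs high",
   "high polygenic risk percentile"]

def genetic_axis_py (variants : List String) : String :=
  let normalized : PySem.Set String := PySem.Set.ofList (variants.map (fun v => PySem.Str.lower v))
  let causative : PySem.Set String := PySem.Set.ofList pvCaus
  let risk : PySem.Set String := PySem.Set.ofList pvRisk
  if PySem.Set.inter normalized causative ≠ [] then "G2"
  else if PySem.Set.inter normalized risk ≠ [] then "G1"
  else "G0"

-- ===== PORT B =====
-- B-side helper: the severity-rank dict literal from Source B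
def pvRank : PySem.Dict String Int :=
  PySem.Dict.ofList
    [("lrrk2 g2019s", 2), ("gba1 l444p", 2), ("snca duplication", 2),
     ("snca triplication", 2), ("park2", 2), ("pink1", 2), ("dj-1", 2),
     ("vps35 d620n", 2),
     ("gba1 n370s", 1), ("gba1 e326k", 1), ("gba1 t369m", 1), ("prs high", 1),
     ("high polygenic risk percentile", 1)]

def genetic_axis_py_alt (variants : List String) : String :=
  let best : Int :=
    variants.foldl (fun b v => max b (PySem.Dict.getD pvRank (PySem.Str.lower v) 0)) 0
  if best = 2 then "G2" else if best = 1 then "G1" else "G0"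

-- ===== PRECONDITION & SPEC =====
def Spec_genetic_axis_py (variants : List String) (out : String) : Prop := out = genetic_axis_py_alt variants
instance (variants : List String) (out : String) : Decidable (Spec_genetic_axis_py variants out) := by unfold Spec_genetic_axis_py; infer_instance

-- ===== CLAIM (what is proved, stated in full; the proofs are below) =====
def Claim_equal_genetic_axis_py : Prop := ∀ (variants : List String), Dom_genetic_axis_py variants → Spec_genetic_axis_py variants (genetic_axis_py variants)

-- ===== LEMMAS AND PROOFS =====

-- the rank table, pointwise
set_option maxHeartbeats 1600000 in
lemma rank_eq (s : String) :
    PySem.Dict.getD pvRank s 0 =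
      if s ∈ pvCaus then 2 else if s ∈ pvRisk then 1 else 0 := by
  simp only [pvRank, pvCaus, pvRisk, PySem.Dict.ofList, PySem.Dict.update, List.foldl_cons,
    List.foldl_nil, PySem.Dict.getD_insert, PySem.Dict.getD_empty, List.mem_cons, List.not_mem_nil]
  split_ifs <;> simp_all

-- nonempty intersection of ofLists ↔ some element of L is a member of C
lemma inter_ne_nil_iff (L C : List String) :
    PySem.Set.inter (PySem.Set.ofList L) (PySem.Set.ofList C) ≠ [] ↔
      ∃ x ∈ L, x ∈ C := by
  rw [← List.isEmpty_eq_false_iff, List.isEmpty_eq_false_iff_exists_mem]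
  constructor
  · rintro ⟨x, hx⟩
    rw [PySem.Set.mem_inter] at hx
    exact ⟨x, by simpa using hx.1, by simpa using hx.2⟩
  · rintro ⟨x, hxL, hxC⟩
    exact ⟨x, by rw [PySem.Set.mem_inter]; exact ⟨by simpa using hxL, by simpa using hxC⟩⟩

-- characterization of B's running maximum
lemma foldl_char (l : List String) : ∀ b : Int, 0 ≤ b →
    l.foldl (fun b v => max b (PySem.Dict.getD pvRank (PySem.Str.lower v) 0)) b =
      max b (if l.any (fun v => decide (PySem.Str.lower v ∈ pvCaus)) then 2
             else if l.any (fun v => decide (PySem.Str.lower v ∈ pvRisk)) then 1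
             else 0) := by
  induction l with
  | nil => intro b hb; simp; omega
  | cons v t ih =>
      intro b hb
      rw [List.foldl_cons, ih _ (le_trans hb (le_max_left _ _))]
      simp only [List.any_cons, rank_eq]
      by_cases hc : PySem.Str.lower v ∈ pvCaus <;>
        by_cases hr : PySem.Str.lower v ∈ pvRisk <;>
          simp [hc, hr] <;> split_ifs <;> omega

-- ===== VERDICT (by name: the statement is the Claim_ definition above) =====
theorem genetic_axis_py_spec : Claim_equal_genetic_axis_py := by
  intro variants _
  show genetic_axis_py variants = genetic_axis_py_alt variants
  unfold genetic_axis_py genetic_axis_py_alt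
  rw [foldl_char variants 0 le_rfl]
  have hc : PySem.Set.inter (PySem.Set.ofList (variants.map (fun v => PySem.Str.lower v)))
      (PySem.Set.ofList pvCaus) ≠ [] ↔ ∃ v ∈ variants, PySem.Str.lower v ∈ pvCaus := by
    rw [inter_ne_nil_iff]
    simp [List.mem_map]
  have hr : PySem.Set.inter (PySem.Set.ofList (variants.map (fun v => PySem.Str.lower v)))
      (PySem.Set.ofList pvRisk) ≠ [] ↔ ∃ v ∈ variants, PySem.Str.lower v ∈ pvRisk := by
    rw [inter_ne_nil_iff]
    simp [List.mem_map]
  by_cases h2 : ∃ v ∈ variants, PySem.Str.lower v ∈ pvCaus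
  · have ha : variants.any (fun v => decide (PySem.Str.lower v ∈ pvCaus)) = true := by
      simpa [List.any_eq_true] using h2
    rw [if_pos (hc.mpr h2)]
    simp [ha]
  · have ha : variants.any (fun v => decide (PySem.Str.lower v ∈ pvCaus)) = false := by
      simpa [List.any_eq_false] using h2
    rw [if_neg (fun h => h2 (hc.mp h))]
    by_cases h1 : ∃ v ∈ variants, PySem.Str.lower v ∈ pvRisk
    · have hb : variants.any (fun v => decide (PySem.Str.lower v ∈ pvRisk)) = true := by
        simpa [List.any_eq_true] using h1
      rw [if_pos (hr.mpr h1)]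
      simp [ha, hb]
    · have hb : variants.any (fun v => decide (PySem.Str.lower v ∈ pvRisk)) = false := by
        simpa [List.any_eq_false] using h1
      rw [if_neg (fun h => h1 (hr.mp h))]
      simp [ha, hb]
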